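-- pv_equiv track=rewrite | github.com/rkdms0116/programmers | 연습문제/택배상자.py | solution
-- ===== SOURCE A (Python) =====
-- def solution(order):
--     # 보조 컨테이너
--     sub_con = []
--     # 메인 컨테이너
--     main_con = []
--     # order의 순서를 확인할 index
--     idx = 0
--     # 컨테이너 벨트에서 나오는 상자 번호
--     n = 1
--
--     while idx < len(order):
--         # 만일 컨테이너 벨트에서 나온 상자가 주문과 일치한다면
--         if order[idx] == n :
--             main_con.append(n)
--             idx += 1
--             n += 1
--         # 보조 컨테이너의 마지막 상자가 주문 순서와 같을 경우
--         elif sub_con and sub_con[-1] == order[idx]: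
--             main_con.append(sub_con.pop())
--             idx += 1
--         else:
--             # 컨테이너 벨트는 n까지만 나올 수 있으므로 check
--             if n == len(order)+1:
--                 return len(main_con)
--             # 어디에도 해당되지 않은 상자는 보조 컨테이너 벨트에 담아줍니다.
--             sub_con.append(n)
--             n += 1
--     return len(main_con)
-- ===== SOURCE B (Python) =====
-- def solution(order):
--     # No stack: the auxiliary container's top is always the largest not-yet-delivered
--     # box among 1..m (boxes come off the belt in increasing order), so box x is
--     # deliverable from the side container iff every box in x+1..m was already delivered.
--     L = len(order)
--     m = 0            # highest box taken off the belt so far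
--     seen = set()     # boxes already delivered
--     for k, x in enumerate(order):
--         if x in seen or x < 1:
--             return k
--         if x > m:
--             if x > L:
--                 return k
--             m = x
--         elif any(v not in seen for v in range(x + 1, m + 1)):
--             return k
--         seen.add(x)
--     return L
-- ===== Notes on version B (the rewrite author's own statement) =====
-- stated objective: alternative
-- what changed: Replaces A's stack simulation (auxiliary container, belt counter n, sentinel return) by a stackless one-pass check: keep the highest belt box m and a set of delivered boxes, and deliver x from the side iff every box in x+1..m is already delivered (the side container is always sorted, so its top is the largest undelivered box <= m).
-- outside the precondition, e.g. on solution([2]): A returns 1, B returns 0; on solution([3, 4, 5, 1]): A does not finish within the time limit, B returns 2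
import Mathlib
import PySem

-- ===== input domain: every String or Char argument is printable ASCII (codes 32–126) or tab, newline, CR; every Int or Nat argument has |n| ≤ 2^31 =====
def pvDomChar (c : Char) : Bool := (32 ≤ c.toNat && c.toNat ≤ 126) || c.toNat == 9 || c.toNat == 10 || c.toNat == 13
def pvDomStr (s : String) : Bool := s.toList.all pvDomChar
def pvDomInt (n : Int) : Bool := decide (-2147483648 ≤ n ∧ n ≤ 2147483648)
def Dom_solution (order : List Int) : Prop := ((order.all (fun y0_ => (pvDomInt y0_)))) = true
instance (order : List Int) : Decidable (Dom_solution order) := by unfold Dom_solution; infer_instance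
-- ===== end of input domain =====

-- B replaces A's stack simulation by a stackless delivered-set characterization (alternative
-- decomposition, not claimed faster); equal to A on every list not containing the label len(order)+1.

-- ===== PORT A =====
-- A's while loop, step for step.  The auxiliary stack is kept top-first (Python's sub_con[-1]
-- = Lean head).  A's loop does not terminate on some inputs outside Pre_ (it keeps appending
-- to sub_con once n has passed len(order)+1), so the port carries fuel; solution gives it
-- 2*len+2, proved sufficient on every input Pre_ admits (lemma aloop_eq below).
def aloop (order : List Int) (fuel idx : Nat) (n : Int) (sub main : List Int) : Int :=
  match fuel with
  | 0 => ((main.length : Nat) : Int)   -- fuel exhaustion (never reached inside Pre_)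
  | fuel + 1 =>
    if idx < order.length then
      if order.getD idx 0 = n then
        aloop order fuel (idx + 1) (n + 1) sub (main ++ [n])
      else if sub.head? = some (order.getD idx 0) then
        aloop order fuel (idx + 1) n sub.tail (main ++ [order.getD idx 0])
      else if n = (order.length : Int) + 1 then ((main.length : Nat) : Int)
      else aloop order fuel idx (n + 1) (n :: sub) main
    else ((main.length : Nat) : Int)

def solution (order : List Int) : Int :=
  aloop order (2 * order.length + 2) 0 1 [] []

-- ===== PORT B =====
-- B's for loop over (k, x) = enumerate(order); state: m = highest belt box taken, seen = set
-- of delivered boxes.  'any(v not in seen for v in range(x+1, m+1))' is the List.any below.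
def bloop (L : Int) (rest : List Int) (k m : Int) (seen : PySem.Set Int) : Int :=
  match rest with
  | [] => L
  | x :: rest =>
    if seen.contains x || x < 1 then k
    else if m < x then
      (if L < x then k else bloop L rest (k + 1) x (seen.add x))
    else if (PySem.List.pyRange (x + 1) (m + 1) 1).any (fun v => !(seen.contains v)) then k
    else bloop L rest (k + 1) m (seen.add x)

def solution_alt (order : List Int) : Int :=
  bloop (order.length : Int) order 0 0 PySem.Set.empty

-- ===== PRECONDITION & SPEC =====
-- Pre_ excludes lists containing the label len(order)+1: the belt carries only boxes
-- 1..len(order), and on such out-of-domain inputs A consumes a phantom box len(order)+1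
-- straight off the belt (or loops forever pushing phantom boxes), which B, delivering only
-- the real boxes, does not reproduce.
def Pre_solution (order : List Int) : Prop := ((order.length : Int) + 1) ∉ order
instance (order : List Int) : Decidable (Pre_solution order) := by unfold Pre_solution; infer_instance
def pvWitness_solution : List Int := [2, 1, 3]
def Spec_solution (order : List Int) (out : Int) : Prop := out = solution_alt order
instance (order : List Int) (out : Int) : Decidable (Spec_solution order out) := by unfold Spec_solution; infer_instance

-- ===== CLAIM (what is proved, stated in full; the proofs are below) =====
def Claim_equal_solution : Prop := ∀ (order : List Int), Dom_solution order → Pre_solution order → Spec_solution order (solution order)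

-- ===== LEMMAS AND PROOFS =====

-- Belt catch-up: when order[idx] = n + j, A pushes the j boxes n..n+j-1 and then delivers
-- n + j from the belt.  pushAll j n is the resulting top-first stack segment [n+j-1, …, n].
def pushAll : Nat → Int → List Int
  | 0, _ => []
  | j + 1, n => pushAll j (n + 1) ++ [n]

lemma mem_pushAll (j : Nat) (n v : Int) : v ∈ pushAll j n ↔ n ≤ v ∧ v < n + j := by
  induction j generalizing n with
  | zero => simp [pushAll]
  | succ j ih => simp [pushAll, ih]; omega

lemma pairwise_pushAll (j : Nat) (n : Int) : List.Pairwise (· > ·) (pushAll j n) := by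
  induction j generalizing n with
  | zero => simp [pushAll]
  | succ j ih =>
    refine List.pairwise_append.mpr ⟨ih (n + 1), List.pairwise_singleton _ _, ?_⟩
    intro a ha b hb
    simp at hb
    have := (mem_pushAll j (n + 1) a).mp ha
    omega

lemma aloop_catchup (order : List Int) (idx : Nat) (hidx : idx < order.length) :
    ∀ (j fuel : Nat) (n : Int) (sub main : List Int),
      order.getD idx 0 = n + j →
      n + j ≤ (order.length : Int) + 1 →
      (∀ s ∈ sub, s < n) →
      j + 1 ≤ fuel →
      aloop order fuel idx n sub main =
        aloop order (fuel - (j + 1)) (idx + 1) (n + j + 1) (pushAll j n ++ sub)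
          (main ++ [n + j]) := by
  intro j
  induction j with
  | zero =>
    intro fuel n sub main hx _ _ hf
    match fuel, hf with
    | fuel + 1, _ =>
      have hx0 : order.getD idx 0 = n := by simpa using hx
      simp only [aloop, if_pos hidx, if_pos hx0]
      norm_num [pushAll]
  | succ j ih =>
    intro fuel n sub main hx hle hsub hf
    match fuel, hf with
    | fuel + 1, _ =>
      have h1 : ¬ order.getD idx 0 = n := by omega
      have h2 : sub.head? ≠ some (order.getD idx 0) := by
        intro h
        have := hsub _ (List.mem_of_mem_head? h)
        omega
      have h3 : ¬ n = (order.length : Int) + 1 := by omega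
      simp only [aloop, if_pos hidx, if_neg h1, if_neg h2, if_neg h3]
      have := ih fuel (n + 1) (n :: sub) main (by push_cast at hx ⊢; omega)
        (by push_cast at hle ⊢; omega)
        (by
          intro s hs
          rcases List.mem_cons.mp hs with h | h
          · omega
          · have := hsub s h
            omega)
        (by omega)
      rw [this]
      have hlist : pushAll j (n + 1) ++ (n :: sub) = pushAll (j + 1) n ++ sub := by
        simp [pushAll]
      rw [hlist]
      have e1 : fuel + 1 - (j + 1 + 1) = fuel - (j + 1) := by omega
      rw [e1]
      push_cast
      have e2 : n + ((j : Int) + 1) = n + 1 + (j : Int) := by ring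
      rw [e2]

-- Failure: when the wanted box can come neither off the belt (order[idx] < n, or it is
-- beyond the last phantom box L+1) nor off the stack top, A pushes up to n = L+1 and
-- returns via its sentinel with len(main_con).
lemma aloop_sentinel (order : List Int) (idx : Nat) (hidx : idx < order.length) :
    ∀ (j fuel : Nat) (n : Int) (sub main : List Int),
      n + j = (order.length : Int) + 1 →
      (order.getD idx 0 < n ∨ (order.length : Int) + 1 < order.getD idx 0) →
      sub.head? ≠ some (order.getD idx 0) →
      j + 1 ≤ fuel →
      aloop order fuel idx n sub main = ((main.length : Nat) : Int) := by
  intro j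
  induction j with
  | zero =>
    intro fuel n sub main hn hx hhd hf
    match fuel, hf with
    | fuel + 1, _ =>
      have h1 : ¬ order.getD idx 0 = n := by
        push_cast at hn
        rcases hx with hx | hx <;> omega
      simp only [aloop, if_pos hidx, if_neg h1, if_neg hhd, if_pos (by omega : n = (order.length : Int) + 1)]
  | succ j ih =>
    intro fuel n sub main hn hx hhd hf
    match fuel, hf with
    | fuel + 1, _ =>
      have hn' : n + (j : Int) + 1 = (order.length : Int) + 1 := by push_cast at hn; omega
      have h1 : ¬ order.getD idx 0 = n := by rcases hx with hx | hx <;> omega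
      have h3 : ¬ n = (order.length : Int) + 1 := by omega
      simp only [aloop, if_pos hidx, if_neg h1, if_neg hhd, if_neg h3]
      exact ih fuel (n + 1) (n :: sub) main (by omega)
        (by
          rcases hx with hx | hx
          · exact Or.inl (by omega)
          · exact Or.inr hx)
        (by
          intro h
          rw [List.head?_cons] at h
          have := Option.some.inj h
          rcases hx with hx | hx <;> omega)
        (by omega)

-- The two boolean loop conditions of B's port, read back as propositions.
lemma bcond_iff (seen : PySem.Set Int) (x : Int) :
    ((seen.contains x || decide (x < 1)) = true) ↔ (x ∈ seen ∨ x < 1) := by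
  simp

lemma anycond_iff (seen : PySem.Set Int) (x m : Int) :
    (((PySem.List.pyRange (x + 1) (m + 1) 1).any (fun v => !(seen.contains v))) = true) ↔
      ∃ v, x < v ∧ v ≤ m ∧ v ∉ seen := by
  simp only [List.any_eq_true, PySem.List.mem_pyRange_one, Bool.not_eq_true']
  constructor
  · rintro ⟨v, ⟨h1, h2⟩, h3⟩
    refine ⟨v, by omega, by omega, ?_⟩
    intro hv
    rw [(PySem.Set.contains_iff seen v).mpr hv] at h3
    exact Bool.true_eq_false.mp h3
  · rintro ⟨v, h1, h2, h3⟩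
    refine ⟨v, ⟨by omega, by omega⟩, ?_⟩
    cases hc : PySem.Set.contains seen v
    · rfl
    · exact absurd ((PySem.Set.contains_iff seen v).mp hc) h3

-- The simulation invariant: A's auxiliary stack sub is exactly the boxes of 1..m not in
-- seen, kept strictly decreasing top-first; under it, A's loop from a clean state
-- (n = m + 1) computes B's remaining iterations.
lemma aloop_eq (order : List Int) (hpre : ((order.length : Int) + 1) ∉ order) :
    ∀ (fuel idx : Nat) (m : Int) (seen : PySem.Set Int) (sub main : List Int),
      idx ≤ order.length →
      (main.length : Int) = idx →
      0 ≤ m → m ≤ (order.length : Int) →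
      (∀ v ∈ seen, 1 ≤ v ∧ v ≤ m) →
      List.Pairwise (· > ·) sub →
      (∀ v, v ∈ sub ↔ (1 ≤ v ∧ v ≤ m ∧ v ∉ seen)) →
      (order.length - idx) + (order.length + 1 - m.toNat) + 1 ≤ fuel →
      aloop order fuel idx (m + 1) sub main =
        bloop (order.length : Int) (order.drop idx) (idx : Int) m seen := by
  intro fuel
  induction fuel using Nat.strong_induction_on with
  | _ fuel ih =>
  intro idx m seen sub main hidx hmain hm0 hmL hseen hpw hmem hf
  by_cases hlt : idx < order.length
  · have hxmem : order.getD idx 0 ∈ order := by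
      rw [List.getD_eq_getElem order 0 hlt]
      exact order.getElem_mem hlt
    set x := order.getD idx 0 with hxdef
    have hxne : x ≠ (order.length : Int) + 1 := fun h => hpre (h ▸ hxmem)
    have hdrop : order.drop idx = x :: order.drop (idx + 1) := by
      rw [List.drop_eq_getElem_cons hlt]
      rw [hxdef, List.getD_eq_getElem order 0 hlt]
    rw [hdrop]
    by_cases hbad : x ∈ seen ∨ x < 1
    · -- B fails at k = idx; A pushes to the sentinel and returns len(main_con) = idx
      have hB : bloop (order.length : Int) (x :: order.drop (idx + 1)) (idx : Int) m seen
          = (idx : Int) := by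
        simp only [bloop]
        rw [if_pos ((bcond_iff seen x).mpr hbad)]
      rw [hB]
      have hxsmall : x < m + 1 := by
        rcases hbad with h | h
        · have := hseen x h
          omega
        · omega
      have hhd : sub.head? ≠ some x := by
        intro h
        have hin := (hmem x).mp (List.mem_of_mem_head? h)
        rcases hbad with h' | h'
        · exact hin.2.2 h'
        · omega
      have := aloop_sentinel order idx hlt ((order.length : Int) - m).toNat fuel (m + 1) sub main
        (by omega) (Or.inl hxsmall) hhd (by omega)
      rw [this, hmain]
    · rw [not_or, not_lt] at hbad
      obtain ⟨hnseen, hx1⟩ := hbad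
      have hcond : ¬ ((seen.contains x || decide (x < 1)) = true) := by
        rw [bcond_iff]
        rintro (h | h)
        · exact hnseen h
        · omega
      by_cases hgt : m < x
      · by_cases hbig : (order.length : Int) < x
        · -- x ≥ L + 2: B fails; A pushes to the sentinel
          have hB : bloop (order.length : Int) (x :: order.drop (idx + 1)) (idx : Int) m seen
              = (idx : Int) := by
            simp only [bloop]
            rw [if_neg hcond, if_pos hgt, if_pos hbig]
          rw [hB]
          have hx2 : (order.length : Int) + 1 < x := by omega
          have hhd : sub.head? ≠ some x := by
            intro h
            have := ((hmem x).mp (List.mem_of_mem_head? h)).2.1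
            omega
          have := aloop_sentinel order idx hlt ((order.length : Int) - m).toNat fuel (m + 1) sub main
            (by omega) (Or.inr hx2) hhd (by omega)
          rw [this, hmain]
        · -- m < x ≤ L: A pushes m+1..x-1 then delivers x from the belt; B takes the belt branch
          rw [not_lt] at hbig
          have hB : bloop (order.length : Int) (x :: order.drop (idx + 1)) (idx : Int) m seen
              = bloop (order.length : Int) (order.drop (idx + 1)) ((idx : Int) + 1) x (seen.add x) := by
            simp only [bloop]
            rw [if_neg hcond, if_pos hgt, if_neg (not_lt.mpr hbig)]
          rw [hB]
          set j : Nat := (x - (m + 1)).toNat with hjdef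
          have hxj : x = (m + 1) + j := by omega
          have hA := aloop_catchup order idx hlt j fuel (m + 1) sub main (by omega) (by omega)
            (fun s hs => by
              have := ((hmem s).mp hs).2.1
              omega) (by omega)
          rw [hA]
          have hfin := ih (fuel - (j + 1)) (by omega) (idx + 1) x (seen.add x)
            (pushAll j (m + 1) ++ sub) (main ++ [(m + 1) + j])
            (by omega)
            (by
              simp only [List.length_append, List.length_singleton]
              push_cast
              omega)
            (by omega) hbig
            (by
              intro v hv
              rcases (PySem.Set.mem_add seen x v).mp hv with h | h
              · have := hseen v h
                omega
              · omega)
            (by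
              refine List.pairwise_append.mpr ⟨pairwise_pushAll j (m + 1), hpw, ?_⟩
              intro a ha b hb
              have h1 := (mem_pushAll j (m + 1) a).mp ha
              have h2 := ((hmem b).mp hb).2.1
              omega)
            (by
              intro v
              simp only [List.mem_append, mem_pushAll, hmem, PySem.Set.mem_add]
              constructor
              · rintro (⟨a1, a2⟩ | ⟨a1, a2, a3⟩)
                · refine ⟨by omega, by omega, ?_⟩
                  rintro (hv | hv)
                  · have := hseen v hv
                    omega
                  · omega
                · refine ⟨a1, by omega, ?_⟩
                  rintro (hv | hv)
                  · exact a3 hv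
                  · omega
              · rintro ⟨a1, a2, a3⟩
                by_cases hvm : v ≤ m
                · exact Or.inr ⟨a1, hvm, fun hh => a3 (Or.inl hh)⟩
                · refine Or.inl ⟨by omega, ?_⟩
                  have hvx : v ≠ x := fun hh => a3 (Or.inr hh)
                  omega)
            (by omega)
          have hxx : m + 1 + (j : Int) + 1 = x + 1 := by omega
          have hkk : ((idx + 1 : Nat) : Int) = (idx : Int) + 1 := by push_cast; ring
          rw [hxx, hfin, hkk]
      · -- 1 ≤ x ≤ m: deliverable from the side container iff every box in x+1..m is seen
        rw [not_lt] at hgt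
        have hxsub : x ∈ sub := (hmem x).mpr ⟨hx1, hgt, hnseen⟩
        by_cases hany : ∃ v, x < v ∧ v ≤ m ∧ v ∉ seen
        · -- B fails; A's stack top is a larger undelivered box, so A also fails
          obtain ⟨v, hv1, hv2, hv3⟩ := hany
          have hvsub : v ∈ sub := (hmem v).mpr ⟨by omega, hv2, hv3⟩
          have hB : bloop (order.length : Int) (x :: order.drop (idx + 1)) (idx : Int) m seen
              = (idx : Int) := by
            simp only [bloop]
            rw [if_neg hcond, if_neg (not_lt.mpr hgt),
              if_pos ((anycond_iff seen x m).mpr ⟨v, hv1, hv2, hv3⟩)]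
          rw [hB]
          have hhd : sub.head? ≠ some x := by
            intro h
            obtain ⟨t, rest, hsubeq⟩ : ∃ t rest, sub = t :: rest := by
              cases sub with
              | nil => simp at h
              | cons a r => exact ⟨a, r, rfl⟩
            subst hsubeq
            have ht : t = x := by simpa using h
            subst ht
            rcases List.mem_cons.mp hvsub with hv | hv
            · omega
            · have := (List.pairwise_cons.mp hpw).1 v hv
              omega
          have := aloop_sentinel order idx hlt ((order.length : Int) - m).toNat fuel (m + 1) sub main
            (by omega) (Or.inl (by omega)) hhd (by omega)
          rw [this, hmain]
        · -- B succeeds; x is the largest undelivered box ≤ m, i.e. A's stack top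
          have hB : bloop (order.length : Int) (x :: order.drop (idx + 1)) (idx : Int) m seen
              = bloop (order.length : Int) (order.drop (idx + 1)) ((idx : Int) + 1) m (seen.add x) := by
            simp only [bloop]
            rw [if_neg hcond, if_neg (not_lt.mpr hgt),
              if_neg (fun hc => hany ((anycond_iff seen x m).mp hc))]
          rw [hB]
          obtain ⟨t, rest, hsubeq⟩ : ∃ t rest, sub = t :: rest := by
            cases sub with
            | nil => simp at hxsub
            | cons a r => exact ⟨a, r, rfl⟩
          subst hsubeq
          have htx : t = x := by
            have htmem := (hmem t).mp List.mem_cons_self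
            by_contra hne
            rcases List.mem_cons.mp hxsub with hx' | hx'
            · exact hne hx'.symm
            · have hgtx := (List.pairwise_cons.mp hpw).1 x hx'
              exact hany ⟨t, by omega, htmem.2.1, htmem.2.2⟩
          subst htx
          have h1 : ¬ order.getD idx 0 = m + 1 := by omega
          have h2 : List.head? (x :: rest) = some (order.getD idx 0) := by
            simp [hxdef]
          match fuel, hf with
          | fuel + 1, _ =>
            simp only [aloop, if_pos hlt, if_neg h1, if_pos h2, List.tail_cons]
            have hfin := ih fuel (by omega) (idx + 1) m (seen.add x) rest
              (main ++ [order.getD idx 0])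
              (by omega)
              (by
                simp only [List.length_append, List.length_singleton]
                push_cast
                omega)
              hm0 hmL
              (by
                intro v hv
                rcases (PySem.Set.mem_add seen x v).mp hv with h | h
                · exact hseen v h
                · subst h
                  exact ⟨hx1, hgt⟩)
              (List.Pairwise.of_cons hpw)
              (by
                intro v
                rw [PySem.Set.mem_add]
                constructor
                · intro hv
                  have hall := (hmem v).mp (List.mem_cons_of_mem x hv)
                  have hvx : v ≠ x := by
                    intro h
                    have := (List.pairwise_cons.mp hpw).1 v hv
                    omega
                  refine ⟨hall.1, hall.2.1, ?_⟩
                  rintro (hh | hh)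
                  · exact hall.2.2 hh
                  · exact hvx hh
                · rintro ⟨a1, a2, a3⟩
                  have hv : v ∈ x :: rest := (hmem v).mpr ⟨a1, a2, fun hh => a3 (Or.inl hh)⟩
                  rcases List.mem_cons.mp hv with hh | hh
                  · exact absurd (Or.inr hh) a3
                  · exact hh)
              (by omega)
            have hkk : ((idx + 1 : Nat) : Int) = (idx : Int) + 1 := by push_cast; ring
            rw [hfin, hkk]
  · -- idx = len(order): both return len(order)
    have hidx' : idx = order.length := by omega
    subst hidx'
    match fuel, hf with
    | fuel + 1, _ =>
      simp only [aloop, if_neg hlt, List.drop_length, bloop]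
      omega

-- ===== VERDICT (by name: the statement is the Claim_ definition above) =====
theorem solution_spec : Claim_equal_solution := by
  intro order _ hpre
  unfold Spec_solution solution solution_alt
  have h := aloop_eq order hpre (2 * order.length + 2) 0 0 PySem.Set.empty [] []
    (by omega) (by simp) (by omega) (by omega)
    (by intro v hv; simp [PySem.Set.empty] at hv)
    (by simp) (by intro v; simp [PySem.Set.empty]; omega) (by omega)
  simpa using h
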